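-- pv_equiv track=rewrite | github.com/Said-Akbar/exercises | double_cola.py | who_is_next
-- ===== SOURCE A (Python) =====
-- def who_is_next(names, r):
--     lname = len(names)
--     # 5 ppl, 1st round 5 (2^0*5), 2nd 10 (2^1*5), 3rd 20 (2^2*5), 4th 40 (2^3*5), so
--     # 5+10+20+40=75. 52 is in 4th round, thus, 40/5=8 for each, 35+8+8 and +8 is penny
--     c =0
--     x=0
--     pos=-1
--     if lname>=r: return names[r-1]
--
--     while x<r: # calculate the sum up to 2^c*lname rounds
--         x = x + (2**c)*lname
--         c +=1
--     prev = x - (2**(c-1))*lname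
--
--     while prev<r: # calculate the position
--         prev += 2**(c-1)
--         pos += 1
--
--     return names[pos]
-- ===== SOURCE B (Python) =====
-- def who_is_next(names, r):
--     n = len(names)
--     if r <= n:
--         return names[r - 1]
--     m = (r + n - 1) // n              # ceil(r/n): number of "base blocks" needed
--     c = m.bit_length()                # smallest c with n*(2**c - 1) >= r
--     half = 2 ** (c - 1)               # size of round c is half*n
--     return names[(r - n * (half - 1) - 1) // half]
-- ===== Notes on version B (the rewrite author's own statement) =====
-- stated objective: alternative
-- what changed: A's two counting loops (doubling-sum loop to find the round, step loop to find the position) are replaced by a closed form: ceil(r/n) via integer division, the round via int.bit_length, and the position via one floor division.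
import Mathlib
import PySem

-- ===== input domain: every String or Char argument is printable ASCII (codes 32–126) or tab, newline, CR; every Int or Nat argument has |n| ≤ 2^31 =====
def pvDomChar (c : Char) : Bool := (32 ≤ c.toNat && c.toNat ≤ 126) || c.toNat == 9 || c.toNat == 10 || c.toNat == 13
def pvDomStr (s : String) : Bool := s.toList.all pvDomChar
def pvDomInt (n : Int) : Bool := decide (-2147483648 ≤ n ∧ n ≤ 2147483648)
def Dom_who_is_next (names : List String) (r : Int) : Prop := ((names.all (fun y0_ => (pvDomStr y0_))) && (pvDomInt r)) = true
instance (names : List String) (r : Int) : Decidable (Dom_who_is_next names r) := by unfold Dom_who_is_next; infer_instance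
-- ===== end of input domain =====

-- B replaces A's two counting loops by a closed form (ceiling division + int.bit_length + one floor division); same measured cost on the generated inputs.


-- ===== PORT A =====
-- first while loop: while x < r: x += 2**c * lname; c += 1
-- (the '1 ≤ n' guard only makes the recursion well-founded; with n = len(names) ≤ 0 Python's loop never terminates, and such inputs are outside Pre_)
def whoLoop1 (n r : Int) (x : Int) (c : Nat) : Int × Nat :=
  if h : x < r ∧ 1 ≤ n then
    whoLoop1 n r (x + 2 ^ c * n) (c + 1)
  else (x, c)
termination_by (r - x).toNat
decreasing_by
  have h1 : (1:Int) ≤ 2 ^ c := one_le_pow₀ (by norm_num)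
  have h2 : (1:Int) * 1 ≤ 2 ^ c * n := mul_le_mul h1 h.2 (by norm_num) (by positivity)
  omega

-- second while loop: while prev < r: prev += step; pos += 1   (step = 2**(c-1) ≥ 1; guard for well-foundedness only)
def whoLoop2 (r s : Int) (prev pos : Int) : Int :=
  if h : prev < r ∧ 1 ≤ s then whoLoop2 r s (prev + s) (pos + 1) else pos
termination_by (r - prev).toNat
decreasing_by omega

def who_is_next (names : List String) (r : Int) : String :=
  let lname : Int := names.length
  if lname ≥ r then (PySem.List.pyGet? names (r - 1)).getD ""
  else
    let p := whoLoop1 lname r 0 0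
    let prev := p.1 - 2 ^ (p.2 - 1) * lname
    let pos := whoLoop2 r (2 ^ (p.2 - 1)) prev (-1)
    (PySem.List.pyGet? names pos).getD ""

-- ===== PORT B =====
def who_is_next_alt (names : List String) (r : Int) : String :=
  let n : Int := names.length
  if r ≤ n then (PySem.List.pyGet? names (r - 1)).getD ""
  else
    let m := PySem.Int.floordiv (r + n - 1) n
    let c := PySem.Int.bitLength m
    let half : Int := 2 ^ (c - 1)
    (PySem.List.pyGet? names (PySem.Int.floordiv (r - n * (half - 1) - 1) half)).getD ""

-- ===== PRECONDITION & SPEC =====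
-- Pre_ excludes only inputs where A raises or diverges: names = [] (the first loop never terminates,
-- or names[r-1] raises IndexError), and r ≤ -len(names) (names[r-1] raises IndexError).
def Pre_who_is_next (names : List String) (r : Int) : Prop :=
  names ≠ [] ∧ 1 - (names.length : Int) ≤ r
instance (names : List String) (r : Int) : Decidable (Pre_who_is_next names r) := by
  unfold Pre_who_is_next; infer_instance
def pvWitness_who_is_next : List String × Int := (["a", "b"], 7)
def Spec_who_is_next (names : List String) (r : Int) (out : String) : Prop := out = who_is_next_alt names r
instance (names : List String) (r : Int) (out : String) : Decidable (Spec_who_is_next names r out) := by unfold Spec_who_is_next; infer_instance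

-- ===== CLAIM (what is proved, stated in full; the proofs are below) =====
def Claim_equal_who_is_next : Prop := ∀ (names : List String) (r : Int), Dom_who_is_next names r → Pre_who_is_next names r → Spec_who_is_next names r (who_is_next names r)

-- ===== LEMMAS AND PROOFS =====

lemma whoLoop1_spec (n r : Int) : ∀ (x : Int) (c : Nat), 1 ≤ n → x = n * (2 ^ c - 1) → x < r →
    (whoLoop1 n r x c).1 = n * (2 ^ (whoLoop1 n r x c).2 - 1) ∧
    r ≤ (whoLoop1 n r x c).1 ∧
    n * (2 ^ ((whoLoop1 n r x c).2 - 1) - 1) < r ∧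
    1 ≤ (whoLoop1 n r x c).2 := by
  intro x c
  induction x, c using whoLoop1.induct n r with
  | case1 x c h ih =>
    intro hn hx hlt
    rw [whoLoop1, dif_pos h]
    by_cases h2 : x + 2 ^ c * n < r
    · exact ih hn (by rw [hx]; ring) h2
    · rw [whoLoop1, dif_neg (by rintro ⟨h3, -⟩; omega)]
      refine ⟨by rw [hx]; ring, by omega, ?_, by omega⟩
      simpa [hx] using hlt
  | case2 x c h =>
    intro hn hx hlt
    exact absurd ⟨hlt, hn⟩ h

lemma whoLoop2_spec (r s : Int) : ∀ (prev pos : Int), 1 ≤ s → prev < r →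
    whoLoop2 r s prev pos = pos + 1 + (r - prev - 1) / s := by
  intro prev pos
  induction prev, pos using whoLoop2.induct r s with
  | case1 prev pos h ih =>
    intro hs hlt
    rw [whoLoop2, dif_pos h]
    by_cases h2 : prev + s < r
    · rw [ih hs h2]
      have : r - prev - 1 = (r - (prev + s) - 1) + 1 * s := by ring
      rw [this, Int.add_mul_ediv_right _ _ (by omega)]
      ring
    · rw [whoLoop2, dif_neg (by rintro ⟨h3, -⟩; omega)]
      have : (r - prev - 1) / s = 0 := Int.ediv_eq_zero_of_lt (by omega) (by omega)
      omega
  | case2 prev pos h =>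
    intro hs hlt
    exact absurd ⟨hlt, hs⟩ h

-- smallest c with n*(2^c-1) ≥ r equals bit_length(ceil(r/n))
lemma c_char (n r : Int) (C : Nat) (hn : 1 ≤ n) (hC : 1 ≤ C)
    (h1 : n * (2 ^ (C - 1) - 1) < r) (h2 : r ≤ n * (2 ^ C - 1)) :
    C = PySem.Int.bitLength (PySem.Int.floordiv (r + n - 1) n) := by
  rw [PySem.Int.floordiv_eq_ediv_of_pos (by omega)]
  set q : Int := (r + n - 1) / n with hq
  have hdm := Int.mul_ediv_add_emod (r + n - 1) n
  have hm0 : 0 ≤ (r + n - 1) % n := Int.emod_nonneg _ (by omega)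
  have hm1 : (r + n - 1) % n < n := Int.emod_lt_of_pos _ (by omega)
  -- n * q + e = r + n - 1, so n*(q-1) < r ≤ n*q
  have hub : n * q < n * 2 ^ C := by nlinarith
  have hlb : n * 2 ^ (C - 1) < n * (q + 1) := by nlinarith
  have hq_ub : q < 2 ^ C := lt_of_mul_lt_mul_left hub (by omega)
  have hq_lb : (2:Int) ^ (C - 1) ≤ q := by
    have := lt_of_mul_lt_mul_left hlb (by omega : (0:Int) ≤ n)
    omega
  have hqpos : 0 < q := lt_of_lt_of_le (by positivity) hq_lb
  -- translate to bitLength bounds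
  have hbu : q.natAbs < 2 ^ PySem.Int.bitLength q := PySem.Int.lt_two_pow_bitLength q
  have hbl : 2 ^ (PySem.Int.bitLength q - 1) ≤ q.natAbs := PySem.Int.two_pow_bitLength_le q (by omega)
  have hqa : (q.natAbs : Int) = q := Int.natAbs_of_nonneg (by omega)
  have hBpos : 1 ≤ PySem.Int.bitLength q := by
    by_contra h
    have : PySem.Int.bitLength q = 0 := by omega
    rw [this] at hbu; simp at hbu; omega
  -- 2^(C-1) ≤ q < 2^C and 2^(B-1) ≤ q < 2^B force C = B
  have e1 : (q.natAbs : Int) < (2:Int) ^ PySem.Int.bitLength q := by exact_mod_cast hbu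
  have e2 : ((2:Int)) ^ (PySem.Int.bitLength q - 1) ≤ (q.natAbs : Int) := by exact_mod_cast hbl
  rw [hqa] at e1 e2
  by_contra hne
  rcases Nat.lt_or_ge C (PySem.Int.bitLength q) with hlt | hge
  · have : C ≤ PySem.Int.bitLength q - 1 := by omega
    have : (2:Int) ^ C ≤ 2 ^ (PySem.Int.bitLength q - 1) := pow_le_pow_right₀ (by norm_num) this
    omega
  · have hlt2 : PySem.Int.bitLength q < C := by omega
    have : PySem.Int.bitLength q ≤ C - 1 := by omega
    have : (2:Int) ^ PySem.Int.bitLength q ≤ 2 ^ (C - 1) := pow_le_pow_right₀ (by norm_num) this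
    omega

-- ===== VERDICT (by name: the statement is the Claim_ definition above) =====
theorem who_is_next_spec : Claim_equal_who_is_next := by
  intro names r _ hpre
  obtain ⟨hne, hlow⟩ := hpre
  have hn1 : 1 ≤ (names.length : Int) := by
    have : names.length ≠ 0 := fun h => hne (List.eq_nil_of_length_eq_zero h)
    omega
  unfold Spec_who_is_next
  simp only [who_is_next, who_is_next_alt]
  by_cases hbr : (names.length : Int) ≥ r
  · rw [if_pos hbr, if_pos (hbr : r ≤ (names.length : Int))]
  · rw [if_neg (by omega), if_neg (by omega)]
    have hspec := whoLoop1_spec (names.length : Int) r 0 0 hn1 (by ring) (by omega)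
    rcases hq : whoLoop1 (names.length : Int) r 0 0 with ⟨X, C⟩
    rw [hq] at hspec
    dsimp only at hspec ⊢
    obtain ⟨hx, hge, hprevlt, hC1⟩ := hspec
    have hpow : (2:Int) ^ C = 2 * 2 ^ (C - 1) := by
      conv_lhs => rw [show C = (C - 1) + 1 from by omega]
      ring
    have hhalf : (1:Int) ≤ 2 ^ (C - 1) := one_le_pow₀ (by norm_num)
    have hprev : X - 2 ^ (C - 1) * (names.length : Int) =
        (names.length : Int) * (2 ^ (C - 1) - 1) := by
      rw [hx, hpow]; ring
    rw [hprev, whoLoop2_spec r _ _ _ hhalf hprevlt,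
      ← c_char (names.length : Int) r C hn1 hC1 hprevlt (by omega),
      PySem.Int.floordiv_eq_ediv_of_pos (by omega : (0:Int) < 2 ^ (C - 1))]
    congr 2
    omega
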